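-- pv_equiv track=rewrite | github.com/AbylleAllen/GPT-Masking-Component | masking/mask_utils.py | build_mask_text
-- ===== SOURCE A (Python) =====
-- def build_mask_text(value: str, mask_char: str, count: int):
--     masked = ""
--     masked_count = 0
--
--     for ch in value:
--         if ch.isalnum() and masked_count < count:
--             masked += mask_char
--             masked_count += 1
--         else:
--             masked += ch
--
--     return masked
-- ===== SOURCE B (Python) =====
-- def build_mask_text(value: str, mask_char: str, count: int):
--     pieces = []
--     budget = count
--     for i, ch in enumerate(value):
--         if budget <= 0:
--             pieces.append(value[i:])
--             break
--         if ch.isalnum():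
--             pieces.append(mask_char)
--             budget -= 1
--         else:
--             pieces.append(ch)
--     return "".join(pieces)
-- ===== Notes on version B (the rewrite author's own statement) =====
-- stated objective: alternative
-- what changed: Replaces A's uniform per-character string concatenation over the whole input with a two-phase pass: a prefix loop over a remaining-budget counter collecting pieces, which breaks as soon as the budget is exhausted and appends the untouched tail as one slice, then a single join.
import Mathlib
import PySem

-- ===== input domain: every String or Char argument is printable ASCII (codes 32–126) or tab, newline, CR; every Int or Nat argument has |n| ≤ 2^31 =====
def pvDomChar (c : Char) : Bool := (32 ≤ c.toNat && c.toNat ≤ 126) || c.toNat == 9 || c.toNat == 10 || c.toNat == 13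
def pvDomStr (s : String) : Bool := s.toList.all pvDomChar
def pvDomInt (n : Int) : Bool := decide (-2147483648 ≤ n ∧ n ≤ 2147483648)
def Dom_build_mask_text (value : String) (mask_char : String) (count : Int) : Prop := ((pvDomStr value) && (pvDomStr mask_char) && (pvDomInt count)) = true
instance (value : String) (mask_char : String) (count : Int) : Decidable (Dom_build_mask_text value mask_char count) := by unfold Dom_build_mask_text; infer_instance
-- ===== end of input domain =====

-- B splits the work into a mask-the-prefix phase with a remaining-budget counter that breaks
-- early and appends the untouched tail as one slice, then joins the pieces; same return value as A.

-- ===== PORT A =====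
-- A's loop: for ch in value: if ch.isalnum() and masked_count < count: masked += mask_char; masked_count += 1 else masked += ch
def bmtLoopA (count : Int) (mask : List Char) : List Char → List Char → Int → List Char
  | [], masked, _ => masked
  | c :: rest, masked, mc =>
    if PySem.Chars.isalnum c && decide (mc < count) then
      bmtLoopA count mask rest (masked ++ mask) (mc + 1)
    else
      bmtLoopA count mask rest (masked ++ [c]) mc

def build_mask_text (value : String) (mask_char : String) (count : Int) : String :=
  String.ofList (bmtLoopA count mask_char.toList value.toList [] 0)

-- ===== PORT B =====
-- B's loop: for i, ch in enumerate(value): if budget <= 0: pieces.append(value[i:]); break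
--           elif ch.isalnum(): pieces.append(mask_char); budget -= 1 else: pieces.append(ch)
-- value[i:] is exactly the remaining character list c :: rest at that point.
def bmtLoopB (mask : List Char) : List Char → Int → List (List Char) → List (List Char)
  | [], _, pieces => pieces
  | c :: rest, budget, pieces =>
    if budget ≤ 0 then pieces ++ [c :: rest]
    else if PySem.Chars.isalnum c then bmtLoopB mask rest (budget - 1) (pieces ++ [mask])
    else bmtLoopB mask rest budget (pieces ++ [[c]])

def build_mask_text_alt (value : String) (mask_char : String) (count : Int) : String :=
  String.ofList (bmtLoopB mask_char.toList value.toList count []).flatten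

-- ===== PRECONDITION & SPEC =====
def Spec_build_mask_text (value : String) (mask_char : String) (count : Int) (out : String) : Prop := out = build_mask_text_alt value mask_char count
instance (value : String) (mask_char : String) (count : Int) (out : String) : Decidable (Spec_build_mask_text value mask_char count out) := by unfold Spec_build_mask_text; infer_instance

-- ===== CLAIM (what is proved, stated in full; the proofs are below) =====
def Claim_equal_build_mask_text : Prop := ∀ (value : String) (mask_char : String) (count : Int), Dom_build_mask_text value mask_char count → Spec_build_mask_text value mask_char count (build_mask_text value mask_char count)

-- ===== LEMMAS AND PROOFS =====

-- A's accumulator factors out.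
theorem bmtLoopA_acc (count : Int) (mask : List Char) (cs : List Char) :
    ∀ (masked : List Char) (mc : Int),
      bmtLoopA count mask cs masked mc = masked ++ bmtLoopA count mask cs [] mc := by
  induction cs with
  | nil => intro masked mc; simp [bmtLoopA]
  | cons c rest ih =>
    intro masked mc
    simp only [bmtLoopA]
    split
    · rw [ih (masked ++ mask) (mc + 1), ih ([] ++ mask) (mc + 1)]; simp
    · rw [ih (masked ++ [c]) mc, ih ([] ++ [c]) mc]; simp

-- B's accumulator factors out (after flattening).
theorem bmtLoopB_acc (mask : List Char) (cs : List Char) :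
    ∀ (budget : Int) (pieces : List (List Char)),
      (bmtLoopB mask cs budget pieces).flatten = pieces.flatten ++ (bmtLoopB mask cs budget []).flatten := by
  induction cs with
  | nil => intro budget pieces; simp [bmtLoopB]
  | cons c rest ih =>
    intro budget pieces
    simp only [bmtLoopB]
    split
    · simp
    · split
      · rw [ih (budget - 1) (pieces ++ [mask]), ih (budget - 1) ([] ++ [mask])]; simp
      · rw [ih budget (pieces ++ [[c]]), ih budget ([] ++ [[c]])]; simp

-- Once the count is reached, A copies the rest verbatim.
theorem bmtLoopA_saturated (count : Int) (mask : List Char) (cs : List Char) :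
    ∀ (masked : List Char) (mc : Int), count ≤ mc →
      bmtLoopA count mask cs masked mc = masked ++ cs := by
  induction cs with
  | nil => intro masked mc _; simp [bmtLoopA]
  | cons c rest ih =>
    intro masked mc h
    have hlt : ¬ (mc < count) := by omega
    simp only [bmtLoopA, hlt, decide_false, Bool.and_false]
    rw [ih (masked ++ [c]) mc h]
    simp

-- Main invariant: A's tail-from-state (mc) equals B's tail-from-budget (count - mc).
theorem bmtLoop_agree (count : Int) (mask : List Char) (cs : List Char) :
    ∀ (mc : Int),
      bmtLoopA count mask cs [] mc = (bmtLoopB mask cs (count - mc) []).flatten := by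
  induction cs with
  | nil => intro mc; simp [bmtLoopA, bmtLoopB]
  | cons c rest ih =>
    intro mc
    by_cases hb : count - mc ≤ 0
    · rw [bmtLoopA_saturated count mask (c :: rest) [] mc (by omega)]
      simp [bmtLoopB, hb]
    · have hlt : mc < count := by omega
      have he : count - mc - 1 = count - (mc + 1) := by omega
      by_cases ha : PySem.Chars.isalnum c = true
      · have hcond : (PySem.Chars.isalnum c && decide (mc < count)) = true := by
          simp [ha, hlt]
        simp only [bmtLoopA, bmtLoopB, hcond, if_true, if_neg hb, if_pos ha]
        rw [bmtLoopA_acc, bmtLoopB_acc, ih (mc + 1), he]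
        simp
      · have hcond : ¬ ((PySem.Chars.isalnum c && decide (mc < count)) = true) := by
          simp [ha]
        simp only [bmtLoopA, bmtLoopB, if_neg hcond, if_neg hb, if_neg ha]
        rw [bmtLoopA_acc, bmtLoopB_acc, ih mc]
        simp

-- ===== VERDICT (by name: the statement is the Claim_ definition above) =====
theorem build_mask_text_spec : Claim_equal_build_mask_text := by
  intro value mask_char count _
  unfold Spec_build_mask_text build_mask_text build_mask_text_alt
  rw [bmtLoop_agree count mask_char.toList value.toList 0]
  norm_num
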